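-- pv_equiv track=rewrite | github.com/aaronfeng369/-Surgical-Planning-for-Brain-Intervention-SPBI | codes/imri_sensor.py | reverse_and_combine_hex_bytes
-- ===== SOURCE A (Python) =====
-- def reverse_and_combine_hex_bytes(hex_number1, hex_number2):
--     # 将十六进制数转换为字符串，并移除前缀'0x'
--     hex_str1 = hex_number1[2:]
--     # 如果长度是奇数，在前面补'0'使其长度为偶数
--     if len(hex_str1) % 2 != 0:
--         hex_str1 = "0" + hex_str1
--     # 将字符串每两个字符分为一组，反转这些组，并重新拼接成一个字符串
--     reversed_hex_str1 = "".join([hex_str1[i : i + 2] for i in range(0, len(hex_str1), 2)][::-1])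
--
--     hex_str2 = hex_number2[2:]
--     if len(hex_str2) % 2 != 0:
--         hex_str2 = "0" + hex_str2
--     reversed_hex_str2 = "".join([hex_str2[i : i + 2] for i in range(0, len(hex_str2), 2)][::-1])
--
--     revesed_combine_hex_str = reversed_hex_str2 + reversed_hex_str1
--
--     # 将反转后的字符串转换回整数，并加上'0x'前缀
--     reversed_hex_number = int(revesed_combine_hex_str, 16)
--
--     return hex(reversed_hex_number)
-- ===== SOURCE B (Python) =====
-- # Little-endian positional arithmetic: accumulate each byte's value at its
-- # reversed position, instead of rebuilding a reversed hex string and re-parsing it.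
--
-- _HEX = "0123456789abcdef"
--
--
-- def _little_endian_value(h):
--     s = h[2:]
--     if len(s) % 2 != 0:
--         s = "0" + s
--     n = 0
--     for i in range(0, len(s), 2):
--         n += (_HEX.index(s[i].lower()) * 16 + _HEX.index(s[i + 1].lower())) << (4 * i)
--     return n, len(s)
--
--
-- def reverse_and_combine_hex_bytes(hex_number1, hex_number2):
--     n1, w1 = _little_endian_value(hex_number1)
--     n2, _ = _little_endian_value(hex_number2)
--     return hex((n2 << (4 * w1)) + n1)
-- ===== Notes on version B (the rewrite author's own statement) =====
-- stated objective: alternative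
-- what changed: B computes the result arithmetically, accumulating each byte's value at its little-endian bit position with shifts, instead of A's build-a-group-list/reverse/join and re-parse of a combined hex string; Pre_ restricts to pure hex-digit payloads (not both empty), excluding the both-empty input where A raises and whitespace/sign/underscore forms that int(s,16) happens to accept after reversal.
-- outside the precondition, e.g. on reverse_and_combine_hex_bytes('0x', '0x  12'): A returns '0x12', B raises ValueError
import Mathlib
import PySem

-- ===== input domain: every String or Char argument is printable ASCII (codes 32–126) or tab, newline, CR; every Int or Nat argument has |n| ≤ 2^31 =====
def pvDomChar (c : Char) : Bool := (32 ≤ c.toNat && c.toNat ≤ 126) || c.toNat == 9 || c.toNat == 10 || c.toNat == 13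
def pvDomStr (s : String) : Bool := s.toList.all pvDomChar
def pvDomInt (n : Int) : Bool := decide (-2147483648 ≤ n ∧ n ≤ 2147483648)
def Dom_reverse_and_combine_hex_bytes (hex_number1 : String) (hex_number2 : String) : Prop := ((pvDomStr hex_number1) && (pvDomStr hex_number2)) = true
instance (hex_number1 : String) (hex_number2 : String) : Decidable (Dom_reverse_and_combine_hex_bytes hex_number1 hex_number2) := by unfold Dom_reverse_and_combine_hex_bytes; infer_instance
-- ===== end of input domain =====

-- B replaces A's group-list/reverse/join/re-parse of a combined hex string by
-- little-endian positional arithmetic (each byte shifted to its reversed position).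


-- shared helpers: hex-digit test/value and hex(n) (a built-in both Pythons call)
def pvIsHexDigit (c : Char) : Bool :=
  ('0' ≤ c && c ≤ '9') || ('A' ≤ c && c ≤ 'F') || ('a' ≤ c && c ≤ 'f')

def pvHexVal (c : Char) : Nat :=
  if c ≤ '9' then c.toNat - 48 else if c ≤ 'F' then c.toNat - 55 else c.toNat - 87

def pvHexDigitChar (n : Nat) : Char := Char.ofNat (if n < 10 then 48 + n else 87 + n)

-- digits of n in base 16, most significant first ([] for 0)
def pvToHex : Nat → List Char
  | 0 => []
  | n + 1 => pvToHex ((n + 1) / 16) ++ [pvHexDigitChar ((n + 1) % 16)]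
  decreasing_by exact Nat.div_lt_self (Nat.succ_pos _) (by norm_num)

-- hex(n): exact for every Int
def pvHex (n : Int) : String :=
  if n < 0 then String.ofList ('-' :: '0' :: 'x' :: pvToHex n.natAbs)
  else if n = 0 then "0x0"
  else String.ofList ('0' :: 'x' :: pvToHex n.toNat)

-- ===== PORT A =====
-- int(s, 16): hand port, exact on nonempty pure-hex-digit strings — the only strings
-- A's combined value can be under Pre_ (whitespace/sign/underscore forms that CPython's
-- int would also accept lie outside Pre_); none = ValueError
def pvInt16? (cs : List Char) : Option Int :=
  if cs ≠ [] ∧ cs.all pvIsHexDigit then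
    some (Int.ofNat (cs.foldl (fun a c => a * 16 + pvHexVal c) 0))
  else none

-- "".join([s[i:i+2] for i in range(0, len(s), 2)][::-1])
def pvRevJoinGroups (s : List Char) : List Char :=
  ((PySem.List.slice? ((PySem.List.pyRange 0 (s.length : Int) 2).map
      (fun i => PySem.List.slice s (some i) (some (i + 2)))) none none (-1)).getD []).flatten

def reverse_and_combine_hex_bytes (hex_number1 : String) (hex_number2 : String) : String :=
  let hex_str1 := PySem.List.slice hex_number1.toList (some 2) none
  let hex_str1 := if hex_str1.length % 2 ≠ 0 then '0' :: hex_str1 else hex_str1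
  let reversed_hex_str1 := pvRevJoinGroups hex_str1
  let hex_str2 := PySem.List.slice hex_number2.toList (some 2) none
  let hex_str2 := if hex_str2.length % 2 ≠ 0 then '0' :: hex_str2 else hex_str2
  let reversed_hex_str2 := pvRevJoinGroups hex_str2
  let revesed_combine_hex_str := reversed_hex_str2 ++ reversed_hex_str1
  -- int raises (none) only outside Pre_; the default is never returned inside Pre_
  pvHex ((pvInt16? revesed_combine_hex_str).getD 0)

-- ===== PORT B =====
-- _little_endian_value(h); _HEX.index(c.lower()) is ported as pvHexVal (exact on
-- hex digits, the only characters reached inside Pre_; s[i] is in range in the loop)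
def pvLittleEndianValue (h : String) : Int × Nat :=
  let s := PySem.List.slice h.toList (some 2) none
  let s := if s.length % 2 ≠ 0 then '0' :: s else s
  let n := (PySem.List.pyRange 0 (s.length : Int) 2).foldl
      (fun n i => n + (((pvHexVal (PySem.List.pyGetD s i '0') * 16
            + pvHexVal (PySem.List.pyGetD s (i + 1) '0') : Nat) : Int) <<< (4 * i).toNat)) 0
  (n, s.length)

def reverse_and_combine_hex_bytes_alt (hex_number1 : String) (hex_number2 : String) : String :=
  let p1 := pvLittleEndianValue hex_number1
  let p2 := pvLittleEndianValue hex_number2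
  pvHex ((p2.1 <<< (4 * p1.2)) + p1.1)

-- ===== PRECONDITION & SPEC =====
-- Pre_ admits exactly the natural domain: both payloads (after the '[2:]' prefix strip)
-- are pure hex digits and not both empty.  It excludes (a) the both-empty case, where A
-- raises ValueError on int('', 16), and (b) payloads with whitespace/sign/underscore
-- characters, where A's int() accidentally accepts some reversed strings (e.g.
-- ('0x', '0x  12')) — there B raises ValueError.
def Pre_reverse_and_combine_hex_bytes (hex_number1 : String) (hex_number2 : String) : Prop :=
  ((hex_number1.toList.drop 2).all pvIsHexDigit && (hex_number2.toList.drop 2).all pvIsHexDigit) = true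
  ∧ ¬(hex_number1.toList.drop 2 = [] ∧ hex_number2.toList.drop 2 = [])

instance (hex_number1 : String) (hex_number2 : String) : Decidable (Pre_reverse_and_combine_hex_bytes hex_number1 hex_number2) := by
  unfold Pre_reverse_and_combine_hex_bytes; infer_instance

def pvWitness_reverse_and_combine_hex_bytes : String × String := ("0x12ab", "0x3")

def Spec_reverse_and_combine_hex_bytes (hex_number1 : String) (hex_number2 : String) (out : String) : Prop := out = reverse_and_combine_hex_bytes_alt hex_number1 hex_number2
instance (hex_number1 : String) (hex_number2 : String) (out : String) : Decidable (Spec_reverse_and_combine_hex_bytes hex_number1 hex_number2 out) := by unfold Spec_reverse_and_combine_hex_bytes; infer_instance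

-- ===== CLAIM (what is proved, stated in full; the proofs are below) =====
def Claim_equal_reverse_and_combine_hex_bytes : Prop := ∀ (hex_number1 : String) (hex_number2 : String), Dom_reverse_and_combine_hex_bytes hex_number1 hex_number2 → Pre_reverse_and_combine_hex_bytes hex_number1 hex_number2 → Spec_reverse_and_combine_hex_bytes hex_number1 hex_number2 (reverse_and_combine_hex_bytes hex_number1 hex_number2)

-- ===== LEMMAS AND PROOFS =====

theorem pvFoldVal_acc (cs : List Char) (a : Nat) :
    cs.foldl (fun a c => a * 16 + pvHexVal c) a
      = a * 16 ^ cs.length + cs.foldl (fun a c => a * 16 + pvHexVal c) 0 := by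
  induction cs generalizing a with
  | nil => simp
  | cons c t ih =>
    simp only [List.foldl_cons, List.length_cons]
    rw [ih (a * 16 + pvHexVal c), ih (0 * 16 + pvHexVal c)]
    ring

theorem pvFoldVal_append (xs ys : List Char) :
    (xs ++ ys).foldl (fun a c => a * 16 + pvHexVal c) 0
      = (xs.foldl (fun a c => a * 16 + pvHexVal c) 0) * 16 ^ ys.length
        + ys.foldl (fun a c => a * 16 + pvHexVal c) 0 := by
  rw [List.foldl_append, pvFoldVal_acc]

theorem pvPyRange_two_step (n : Nat) :
    PySem.List.pyRange 0 ((n : Int) + 2) 2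
      = 0 :: (PySem.List.pyRange 0 (n : Int) 2).map (· + 2) := by
  rw [PySem.List.pyRange_of_pos _ _ (by norm_num), PySem.List.pyRange_of_pos _ _ (by norm_num)]
  have h1 : (0:Int) < (n:Int) + 2 := by omega
  have e1 : (((n:Int) + 2 - 0 + 2 - 1) / 2).toNat = (n+1)/2 + 1 := by omega
  simp only [if_pos h1, e1]
  rcases Nat.eq_zero_or_pos n with h0 | h0
  · subst h0; simp [List.range_succ]
  · have h2 : (0:Int) < (n:Int) := by omega
    have e2 : (((n:Int) - 0 + 2 - 1) / 2).toNat = (n+1)/2 := by omega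
    simp only [if_pos h2, e2, List.range_succ_eq_map]
    simp [List.map_map, Function.comp]
    intro a _
    ring

theorem pvGroups_cons (a b : Char) (t : List Char) :
    (PySem.List.pyRange 0 (((a :: b :: t).length : Int)) 2).map
        (fun i => PySem.List.slice (a :: b :: t) (some i) (some (i + 2)))
      = [a, b] :: (PySem.List.pyRange 0 ((t.length : Int)) 2).map
        (fun i => PySem.List.slice t (some i) (some (i + 2))) := by
  have e : (((a :: b :: t).length : Int)) = (t.length : Int) + 2 := by
    simp [List.length_cons]; ring
  rw [e, pvPyRange_two_step, List.map_cons, List.map_map]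
  congr 1
  apply List.map_congr_left
  intro i hi
  have h0 : 0 ≤ i := by
    have := (PySem.List.mem_pyRange_iff_of_pos (by norm_num : (0:Int) < 2) i).mp hi
    omega
  simp only [Function.comp]
  rw [PySem.List.slice_toNat _ (by omega) (by omega), PySem.List.slice_toNat _ (by omega) (by omega)]
  have e1 : (i + 2).toNat = i.toNat + 2 := by omega
  have e2 : (i + 2 + 2).toNat = i.toNat + 4 := by omega
  rw [e1, e2]
  simp [List.drop_succ_cons]

def pvPairsVal : List Char → Nat
  | a :: b :: t => (pvHexVal a * 16 + pvHexVal b) + 256 * pvPairsVal t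
  | _ => 0

theorem pvRevJoin_cons (a b : Char) (t : List Char) :
    pvRevJoinGroups (a :: b :: t) = pvRevJoinGroups t ++ [a, b] := by
  simp only [pvRevJoinGroups, PySem.List.slice?_none_none_neg_one, Option.getD_some]
  rw [pvGroups_cons, List.reverse_cons, List.flatten_append]
  simp

theorem pvRevJoin_perm : ∀ (s : List Char), s.length % 2 = 0 → (pvRevJoinGroups s).Perm s
  | [], _ => by simp [show pvRevJoinGroups [] = [] from rfl]
  | [a], h => by simp at h
  | a :: b :: t, h => by
    rw [pvRevJoin_cons]
    have ht : t.length % 2 = 0 := by simp [List.length_cons] at h; omega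
    have ih := pvRevJoin_perm t ht
    exact (ih.append_right [a, b]).trans
      (by simpa using List.perm_append_comm (l₁ := t) (l₂ := [a, b]))

theorem pvRevJoin_val : ∀ (s : List Char), s.length % 2 = 0 →
    (pvRevJoinGroups s).foldl (fun a c => a * 16 + pvHexVal c) 0 = pvPairsVal s
  | [], _ => by simp [show pvRevJoinGroups [] = [] from rfl, pvPairsVal]
  | [a], h => by simp at h
  | a :: b :: t, h => by
    rw [pvRevJoin_cons, pvFoldVal_append]
    have ht : t.length % 2 = 0 := by simp [List.length_cons] at h; omega
    rw [pvRevJoin_val t ht]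
    simp [pvPairsVal]
    ring

theorem pvLittle_val : ∀ (s : List Char), s.length % 2 = 0 →
    (PySem.List.pyRange 0 (s.length : Int) 2).foldl
      (fun n i => n + (((pvHexVal (PySem.List.pyGetD s i '0') * 16
            + pvHexVal (PySem.List.pyGetD s (i + 1) '0') : Nat) : Int) <<< (4 * i).toNat)) 0
      = (pvPairsVal s : Int)
  | [], _ => by simp [pvPairsVal]; rfl
  | [a], h => by simp at h
  | a :: b :: t, h => by
    have ht : t.length % 2 = 0 := by simp [List.length_cons] at h; omega
    have ih := pvLittle_val t ht
    rw [PySem.List.foldl_add] at ih ⊢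
    have e : (((a :: b :: t).length : Int)) = (t.length : Int) + 2 := by
      simp [List.length_cons]; ring
    rw [e, pvPyRange_two_step, List.map_cons, List.map_map]
    have hhead : (((pvHexVal (PySem.List.pyGetD (a :: b :: t) 0 '0') * 16
            + pvHexVal (PySem.List.pyGetD (a :: b :: t) (0 + 1) '0') : Nat) : Int) <<< (4 * (0:Int)).toNat)
        = ((pvHexVal a * 16 + pvHexVal b : Nat) : Int) := by
      norm_num [PySem.List.pyGetD_ofNat']
    have htail : List.map ((fun i => (((pvHexVal (PySem.List.pyGetD (a :: b :: t) i '0') * 16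
            + pvHexVal (PySem.List.pyGetD (a :: b :: t) (i + 1) '0') : Nat) : Int) <<< (4 * i).toNat)) ∘ (· + 2))
          (PySem.List.pyRange 0 (t.length : Int) 2)
        = List.map (fun i => (256 : Int) * (((pvHexVal (PySem.List.pyGetD t i '0') * 16
            + pvHexVal (PySem.List.pyGetD t (i + 1) '0') : Nat) : Int) <<< (4 * i).toNat))
          (PySem.List.pyRange 0 (t.length : Int) 2) := by
      apply List.map_congr_left
      intro i hi
      have h0 : 0 ≤ i := by
        have := (PySem.List.mem_pyRange_iff_of_pos (by norm_num : (0:Int) < 2) i).mp hi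
        omega
      simp only [Function.comp]
      rw [PySem.List.pyGetD_of_nonneg _ _ (by omega : (0:Int) ≤ i + 2),
          PySem.List.pyGetD_of_nonneg _ _ (by omega : (0:Int) ≤ i + 2 + 1),
          PySem.List.pyGetD_of_nonneg _ _ h0,
          PySem.List.pyGetD_of_nonneg _ _ (by omega : (0:Int) ≤ i + 1)]
      have e1 : (i + 2).toNat = i.toNat + 2 := by omega
      have e2 : (i + 2 + 1).toNat = (i + 1).toNat + 2 := by omega
      have e3 : (4 * (i + 2)).toNat = (4 * i).toNat + 8 := by omega
      rw [e1, e2, e3]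
      simp only [List.getD_cons_succ]
      rw [Int.shiftLeft_eq, Int.shiftLeft_eq, pow_add]
      ring
    rw [List.sum_cons, hhead, htail, List.sum_map_mul_left]
    have : (List.map (fun i => (((pvHexVal (PySem.List.pyGetD t i '0') * 16
            + pvHexVal (PySem.List.pyGetD t (i + 1) '0') : Nat) : Int) <<< (4 * i).toNat))
          (PySem.List.pyRange 0 (t.length : Int) 2)).sum = (pvPairsVal t : Int) := by
      simpa using ih
    rw [this]
    simp [pvPairsVal]

theorem pvPad_even (t : List Char) :
    (if t.length % 2 ≠ 0 then '0' :: t else t).length % 2 = 0 := by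
  split
  · simp only [List.length_cons]; omega
  · omega

theorem pvPad_all (t : List Char) (h : t.all pvIsHexDigit = true) :
    (if t.length % 2 ≠ 0 then '0' :: t else t).all pvIsHexDigit = true := by
  split <;> simp [h]
  decide

theorem pvPad_nil_iff (t : List Char) :
    (if t.length % 2 ≠ 0 then '0' :: t else t) = [] ↔ t = [] := by
  split
  · constructor
    · intro hc; cases hc
    · intro hc; subst hc; simp_all
  · rfl

theorem pvMain (t1 t2 : List Char)
    (ha1 : t1.all pvIsHexDigit = true) (ha2 : t2.all pvIsHexDigit = true)
    (hne : ¬(t1 = [] ∧ t2 = [])) :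
    (pvInt16? (pvRevJoinGroups (if t2.length % 2 ≠ 0 then '0' :: t2 else t2)
        ++ pvRevJoinGroups (if t1.length % 2 ≠ 0 then '0' :: t1 else t1))).getD 0
      = (((PySem.List.pyRange 0 (((if t2.length % 2 ≠ 0 then '0' :: t2 else t2).length : Int)) 2).foldl
          (fun n i => n + (((pvHexVal (PySem.List.pyGetD (if t2.length % 2 ≠ 0 then '0' :: t2 else t2) i '0') * 16
                + pvHexVal (PySem.List.pyGetD (if t2.length % 2 ≠ 0 then '0' :: t2 else t2) (i + 1) '0') : Nat) : Int) <<< (4 * i).toNat)) 0)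
          <<< (4 * (if t1.length % 2 ≠ 0 then '0' :: t1 else t1).length))
        + ((PySem.List.pyRange 0 (((if t1.length % 2 ≠ 0 then '0' :: t1 else t1).length : Int)) 2).foldl
          (fun n i => n + (((pvHexVal (PySem.List.pyGetD (if t1.length % 2 ≠ 0 then '0' :: t1 else t1) i '0') * 16
                + pvHexVal (PySem.List.pyGetD (if t1.length % 2 ≠ 0 then '0' :: t1 else t1) (i + 1) '0') : Nat) : Int) <<< (4 * i).toNat)) 0) := by
  set s1 := if t1.length % 2 ≠ 0 then '0' :: t1 else t1 with hs1
  set s2 := if t2.length % 2 ≠ 0 then '0' :: t2 else t2 with hs2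
  have he1 : s1.length % 2 = 0 := pvPad_even t1
  have he2 : s2.length % 2 = 0 := pvPad_even t2
  have p1 := pvRevJoin_perm s1 he1
  have p2 := pvRevJoin_perm s2 he2
  -- the combined string is nonempty and pure hex
  have hall : (pvRevJoinGroups s2 ++ pvRevJoinGroups s1).all pvIsHexDigit = true := by
    rw [List.all_append]
    have := (p1.all_eq (f := pvIsHexDigit)).trans (pvPad_all t1 ha1)
    have := (p2.all_eq (f := pvIsHexDigit)).trans (pvPad_all t2 ha2)
    simp_all
  have hlen1 : (pvRevJoinGroups s1).length = s1.length := p1.length_eq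
  have hnil : pvRevJoinGroups s2 ++ pvRevJoinGroups s1 ≠ [] := by
    intro hc
    rcases List.append_eq_nil_iff.mp hc with ⟨c2, c1⟩
    apply hne
    constructor
    · have : s1 = [] := by
        have := p1.length_eq; rw [c1] at this; exact List.eq_nil_of_length_eq_zero this.symm
      exact (pvPad_nil_iff t1).mp this
    · have : s2 = [] := by
        have := p2.length_eq; rw [c2] at this; exact List.eq_nil_of_length_eq_zero this.symm
      exact (pvPad_nil_iff t2).mp this
  rw [pvInt16?, if_pos ⟨hnil, hall⟩, Option.getD_some]
  rw [pvLittle_val s1 he1, pvLittle_val s2 he2]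
  rw [pvFoldVal_append, pvRevJoin_val s1 he1, pvRevJoin_val s2 he2, hlen1]
  rw [Int.shiftLeft_eq]
  have h16 : (2:Int) ^ (4 * s1.length) = 16 ^ s1.length := by
    rw [pow_mul]; norm_num
  rw [h16]
  simp only [Int.ofNat_eq_natCast]
  push_cast
  ring

theorem pvSlice2 (l : List Char) : PySem.List.slice l (some 2) none = l.drop 2 := by
  exact PySem.List.slice_from l (by norm_num)

-- ===== VERDICT (by name: the statement is the Claim_ definition above) =====
theorem reverse_and_combine_hex_bytes_spec : Claim_equal_reverse_and_combine_hex_bytes := by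
  intro hex_number1 hex_number2 _ hpre
  obtain ⟨hall, hne⟩ := hpre
  rw [Bool.and_eq_true] at hall
  show reverse_and_combine_hex_bytes _ _ = reverse_and_combine_hex_bytes_alt _ _
  simp only [reverse_and_combine_hex_bytes, reverse_and_combine_hex_bytes_alt,
    pvLittleEndianValue, pvSlice2]
  refine congrArg pvHex ?_
  exact pvMain (hex_number1.toList.drop 2) (hex_number2.toList.drop 2) hall.1 hall.2 hne
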